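-- pv_equiv track=rewrite | github.com/pypi-data/pypi-mirror-400 | packages/re-common/re_common-10.0.43-py3-none-any.whl/re_common/v2/baselibrary/utils/author_smi.py | check_common_elements_by_length_rank
-- ===== SOURCE A (Python) =====
-- def check_common_elements_by_length_rank(list1, list2):
--     # 获取两个列表的交集
--     set1 = set(list1)
--     set2 = set(list2)
--
--     common_elements = set1 & set2  # 获取交集
--
--     if not common_elements:
--         return False
--
--     # 确定较短的列表
--     short_list = list1 if len(list1) < len(list2) else list2
--
--     # 按字符长度排序短列表
--     sorted_short_list = sorted(short_list, key=len)
--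
--     for word in common_elements:
--         # 获取该单词在短列表中的字符长度排名
--         length_rank = sorted_short_list.index(word) + 1  # +1 因为列表索引从0开始
--         # 如果单个字母跳过
--         if len(word) == 1:
--             continue
--
--         if length_rank / len(sorted_short_list) > 0.5:
--             # 说明 命中了长字符串相等
--             return True
--
--     return False
-- ===== SOURCE B (Python) =====
-- def check_common_elements_by_length_rank(list1, list2):
--     if len(list1) < len(list2):
--         short, other = list1, list2
--     else:
--         short, other = list2, list1
--     s = sorted(short, key=len)
--     # A common word (len != 1) ranks in the longer half iff it never occurs
--     # in the lower half s[:len(s)//2] of the length-sorted short list.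
--     lower_half = set(s[:len(s) // 2])
--     other_set = set(other)
--     return any(len(w) != 1 and w in other_set and w not in lower_half for w in s)
-- ===== Notes on version B (the rewrite author's own statement) =====
-- stated objective: simpler
-- what changed: Instead of looking up each common element's rank with sorted_list.index and comparing a float ratio, B builds the lower half s[:len(s)//2] of the length-sorted short list once as a set and returns whether any common non-single-character word is absent from it.
import Mathlib
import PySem

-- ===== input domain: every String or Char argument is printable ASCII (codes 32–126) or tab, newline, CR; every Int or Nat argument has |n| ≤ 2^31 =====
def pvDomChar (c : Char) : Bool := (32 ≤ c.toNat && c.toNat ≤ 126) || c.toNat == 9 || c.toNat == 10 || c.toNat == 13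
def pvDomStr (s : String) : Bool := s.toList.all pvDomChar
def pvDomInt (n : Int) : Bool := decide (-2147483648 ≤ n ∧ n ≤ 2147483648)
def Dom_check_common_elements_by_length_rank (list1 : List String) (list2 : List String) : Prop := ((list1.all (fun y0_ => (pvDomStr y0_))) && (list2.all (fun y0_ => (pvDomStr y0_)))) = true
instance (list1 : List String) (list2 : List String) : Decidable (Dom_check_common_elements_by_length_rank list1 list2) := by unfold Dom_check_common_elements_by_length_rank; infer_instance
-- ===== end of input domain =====

-- B replaces the per-common-element rank lookup by a single membership test against the lower half of the length-sorted short list (simpler decomposition).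


-- ===== PORT A =====
def check_common_elements_by_length_rank (list1 : List String) (list2 : List String) : Bool :=
  let set1 : PySem.Set String := PySem.Set.ofList list1
  let set2 : PySem.Set String := PySem.Set.ofList list2
  let common : PySem.Set String := PySem.Set.inter set1 set2
  if common.isEmpty then false
  else
    let short := if list1.length < list2.length then list1 else list2
    let sorted_short_list := PySem.List.sorted short (fun w => PySem.Str.len w) false
    -- the loop returns True on the first hit; the result is order-independent (an 'any'),
    -- so consuming the set's element list is exact
    common.any (fun word =>
      match PySem.List.index? sorted_short_list word with
      | some i =>
        if PySem.Str.len word == 1 then false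
        -- rank / L > 0.5 on Python floats is exact here: 2*rank > L as integers
        else decide (2 * (i + 1) > sorted_short_list.length)
      | none => false)  -- unreachable: word ∈ common ⊆ short ⊆ sorted_short_list

-- ===== PORT B =====
def check_common_elements_by_length_rank_alt (list1 : List String) (list2 : List String) : Bool :=
  let p := if list1.length < list2.length then (list1, list2) else (list2, list1)
  let s := PySem.List.sorted p.1 (fun w => PySem.Str.len w) false
  -- s[:len(s)//2] with a nonnegative bound is List.take
  let lowerHalf : PySem.Set String := PySem.Set.ofList (s.take (s.length / 2))
  let otherSet : PySem.Set String := PySem.Set.ofList p.2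
  s.any (fun w =>
    decide (PySem.Str.len w ≠ 1) && PySem.Set.contains otherSet w &&
      !(PySem.Set.contains lowerHalf w))

-- ===== PRECONDITION & SPEC =====
def Spec_check_common_elements_by_length_rank (list1 : List String) (list2 : List String) (out : Bool) : Prop := out = check_common_elements_by_length_rank_alt list1 list2
instance (list1 : List String) (list2 : List String) (out : Bool) : Decidable (Spec_check_common_elements_by_length_rank list1 list2 out) := by unfold Spec_check_common_elements_by_length_rank; infer_instance

-- ===== CLAIM (what is proved, stated in full; the proofs are below) =====
def Claim_equal_check_common_elements_by_length_rank : Prop := ∀ (list1 : List String) (list2 : List String), Dom_check_common_elements_by_length_rank list1 list2 → Spec_check_common_elements_by_length_rank list1 list2 (check_common_elements_by_length_rank list1 list2)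

-- ===== LEMMAS AND PROOFS =====

-- first index k of w in xs: w occurs among the first n elements iff k < n
lemma pv_mem_take_iff {α : Type} [BEq α] [LawfulBEq α] (xs : List α) (w : α) (k : Nat)
    (h : PySem.List.index? xs w = some k) (n : Nat) : w ∈ xs.take n ↔ k < n := by
  rw [PySem.List.index?_eq_some_iff] at h
  obtain ⟨pre, suf, rfl, rfl, hw⟩ := h
  rw [List.take_append, List.mem_append]
  constructor
  · rintro (h1 | h2)
    · exact absurd (List.take_subset _ _ h1) hw
    · rcases Nat.eq_zero_or_pos (n - pre.length) with hz | hp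
      · simp [hz] at h2
      · omega
  · intro hk
    right
    obtain ⟨m, hm⟩ : ∃ m, n - pre.length = m + 1 := ⟨n - pre.length - 1, by omega⟩
    simp [hm]

-- the two loop bodies agree: per-common-element rank test vs lower-half membership test
lemma pv_core (short other common : List String)
    (hc : ∀ w, w ∈ common ↔ w ∈ short ∧ w ∈ other) :
    (common.any (fun word =>
      match PySem.List.index? (PySem.List.sorted short (fun w => PySem.Str.len w) false) word with
      | some i =>
        if PySem.Str.len word == 1 then false
        else decide (2 * (i + 1) > (PySem.List.sorted short (fun w => PySem.Str.len w) false).length)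
      | none => false))
    = ((PySem.List.sorted short (fun w => PySem.Str.len w) false).any (fun w =>
        decide (PySem.Str.len w ≠ 1) && PySem.Set.contains (PySem.Set.ofList other) w &&
          !(PySem.Set.contains (PySem.Set.ofList
              ((PySem.List.sorted short (fun w => PySem.Str.len w) false).take
                ((PySem.List.sorted short (fun w => PySem.Str.len w) false).length / 2))) w))) := by
  set s := PySem.List.sorted short (fun w => PySem.Str.len w) false with hs
  have hmem : ∀ w : String, w ∈ s ↔ w ∈ short := fun w => PySem.List.mem_sorted _ _ _ _
  rw [Bool.eq_iff_iff]
  simp only [List.any_eq_true]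
  constructor
  · rintro ⟨w, hwc, hpred⟩
    obtain ⟨hw1, hw2⟩ := (hc w).mp hwc
    have hws : w ∈ s := (hmem w).mpr hw1
    obtain ⟨k, hk⟩ : ∃ k, PySem.List.index? s w = some k := by
      rcases hidx : PySem.List.index? s w with _ | k
      · rw [PySem.List.index?_eq_none_iff] at hidx; exact absurd hws hidx
      · exact ⟨k, rfl⟩
    rw [hk] at hpred
    have hpred' : (if PySem.Str.len w == 1 then false
        else decide (2 * (k + 1) > s.length)) = true := hpred
    by_cases hlen1 : PySem.Str.len w = 1
    · rw [if_pos (by simpa using hlen1)] at hpred'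
      exact absurd hpred' (by simp)
    · rw [if_neg (by simpa using hlen1)] at hpred'
      have hgt : s.length < 2 * (k + 1) := by simpa using hpred'
      have hnt : w ∉ s.take (s.length / 2) := by
        rw [pv_mem_take_iff s w k hk]; omega
      refine ⟨w, hws, ?_⟩
      simp only [Bool.and_eq_true, Bool.not_eq_true', decide_eq_true_eq]
      refine ⟨⟨hlen1, ?_⟩, ?_⟩
      · simp [pysem, hw2]
      · simp only [← Bool.not_eq_true]
        simp [pysem, hnt]
  · rintro ⟨w, hws, hpred⟩
    simp only [Bool.and_eq_true, Bool.not_eq_true', decide_eq_true_eq] at hpred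
    obtain ⟨⟨hlen1, hcont⟩, hnot⟩ := hpred
    have hw1 : w ∈ short := (hmem w).mp hws
    have hw2 : w ∈ other := by simpa [pysem] using hcont
    have hnt : w ∉ s.take (s.length / 2) := by
      intro hmem'
      rw [show (PySem.Set.contains (PySem.Set.ofList (s.take (s.length / 2))) w) = true by
        simp [pysem, hmem']] at hnot
      exact absurd hnot (by simp)
    obtain ⟨k, hk⟩ : ∃ k, PySem.List.index? s w = some k := by
      rcases hidx : PySem.List.index? s w with _ | k
      · rw [PySem.List.index?_eq_none_iff] at hidx; exact absurd hws hidx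
      · exact ⟨k, rfl⟩
    refine ⟨w, (hc w).mpr ⟨hw1, hw2⟩, ?_⟩
    rw [hk]
    have hkge : ¬ k < s.length / 2 := fun h => hnt ((pv_mem_take_iff s w k hk _).mpr h)
    have hL : k < s.length := (PySem.List.getElem_of_index?_eq_some hk).choose
    show (if PySem.Str.len w == 1 then false
        else decide (2 * (k + 1) > s.length)) = true
    rw [if_neg (by simpa using hlen1)]
    simp only [gt_iff_lt, decide_eq_true_eq]
    omega

lemma pv_branch (l1 l2 short other : List String)
    (hc : ∀ w, w ∈ PySem.Set.inter (PySem.Set.ofList l1) (PySem.Set.ofList l2) ↔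
          w ∈ short ∧ w ∈ other) :
    (if (PySem.Set.inter (PySem.Set.ofList l1) (PySem.Set.ofList l2)).isEmpty then false
     else (PySem.Set.inter (PySem.Set.ofList l1) (PySem.Set.ofList l2)).any (fun word =>
      match PySem.List.index? (PySem.List.sorted short (fun w => PySem.Str.len w) false) word with
      | some i =>
        if PySem.Str.len word == 1 then false
        else decide (2 * (i + 1) > (PySem.List.sorted short (fun w => PySem.Str.len w) false).length)
      | none => false))
    = ((PySem.List.sorted short (fun w => PySem.Str.len w) false).any (fun w =>
        decide (PySem.Str.len w ≠ 1) && PySem.Set.contains (PySem.Set.ofList other) w &&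
          !(PySem.Set.contains (PySem.Set.ofList
              ((PySem.List.sorted short (fun w => PySem.Str.len w) false).take
                ((PySem.List.sorted short (fun w => PySem.Str.len w) false).length / 2))) w))) := by
  have hcore := pv_core short other _ hc
  split_ifs with hemp
  · rw [← hcore]
    rw [List.isEmpty_iff] at hemp
    simp [hemp]
  · exact hcore

-- ===== VERDICT (by name: the statement is the Claim_ definition above) =====
theorem check_common_elements_by_length_rank_spec : Claim_equal_check_common_elements_by_length_rank := by
  intro list1 list2 _hdom
  unfold Spec_check_common_elements_by_length_rank
  unfold check_common_elements_by_length_rank check_common_elements_by_length_rank_alt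
  by_cases hlt : list1.length < list2.length
  · simp only [if_pos hlt]
    exact pv_branch list1 list2 list1 list2 (by intro w; simp [pysem])
  · simp only [if_neg hlt]
    exact pv_branch list1 list2 list2 list1 (by intro w; simp [pysem]; tauto)
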